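-- pv_equiv track=rewrite | github.com/benquick123/code-profiling | code/batch-1/vse-naloge-brez-testov/DN7-M-177.py | brez_sosedov
-- ===== SOURCE A (Python) =====
-- def vsa_polja(s, v):
--     return ((x, y) for x in range(s) for y in range(v))
--
-- def sosedov(x, y, mine):
--     st_sosedov = 0
--     for x1,y1 in mine:
--         if x1 != x or y1 != y:
--             x1 = abs(x1 - x)
--             y1 = abs(y1 - y)
--             if (x1 == 1 or x1 == 0) and (y1 == 1 or y1 == 0):
--                 st_sosedov += 1
--     return st_sosedov
--
-- def brez_sosedov(mine, s, v):
--     ni_soseda = 0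
--     mnozica = set()
--     for x,y in vsa_polja(s,v):
--         if sosedov(x,y,mine) > ni_soseda:
--             continue
--         else:
--             mnozica.add((x,y))
--     return mnozica
-- ===== SOURCE B (Python) =====
-- OFFS = [(-1, -1), (-1, 0), (-1, 1), (0, -1), (0, 1), (1, -1), (1, 0), (1, 1)]
--
-- def brez_sosedov(mine, s, v):
--     mine_set = set(mine)
--     return {(x, y)
--             for x in range(s)
--             for y in range(v)
--             if all((x + dx, y + dy) not in mine_set for dx, dy in OFFS)}
-- ===== Notes on version B (the rewrite author's own statement) =====
-- stated objective: idiomatic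
-- what changed: B builds a mine set once and, for each field, probes only the 8 fixed neighbour offsets against it (as a set comprehension), instead of A's per-field scan over the whole mine list counting neighbours.
import Mathlib
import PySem

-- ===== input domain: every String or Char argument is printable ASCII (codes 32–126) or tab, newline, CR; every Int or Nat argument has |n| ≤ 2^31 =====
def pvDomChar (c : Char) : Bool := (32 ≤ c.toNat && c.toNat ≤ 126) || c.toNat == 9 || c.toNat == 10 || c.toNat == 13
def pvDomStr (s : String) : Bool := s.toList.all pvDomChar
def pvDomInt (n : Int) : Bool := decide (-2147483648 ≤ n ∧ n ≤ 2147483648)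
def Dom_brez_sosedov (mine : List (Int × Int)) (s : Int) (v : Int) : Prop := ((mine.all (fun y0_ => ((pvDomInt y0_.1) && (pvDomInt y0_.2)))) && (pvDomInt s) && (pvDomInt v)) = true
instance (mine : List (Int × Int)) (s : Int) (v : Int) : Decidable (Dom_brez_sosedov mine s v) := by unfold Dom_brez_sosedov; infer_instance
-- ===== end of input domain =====

-- B replaces A's per-field scan of the whole mine list by one mine set probed at the 8
-- fixed neighbour offsets, written as a set comprehension (idiomatic).

-- ===== PORT A =====
def vsa_polja (s v : Int) : List (Int × Int) :=
  (PySem.List.pyRange 0 s 1).flatMap (fun x => (PySem.List.pyRange 0 v 1).map (fun y => (x, y)))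

def sosedov (x y : Int) (mine : List (Int × Int)) : Int :=
  mine.foldl (fun st_sosedov p =>
    if p.1 ≠ x ∨ p.2 ≠ y then
      if (|p.1 - x| = 1 ∨ |p.1 - x| = 0) ∧ (|p.2 - y| = 1 ∨ |p.2 - y| = 0) then
        st_sosedov + 1
      else st_sosedov
    else st_sosedov) 0

def brez_sosedov (mine : List (Int × Int)) (s : Int) (v : Int) : List (Int × Int) :=
  (vsa_polja s v).foldl
    (fun mnozica p => if sosedov p.1 p.2 mine > 0 then mnozica else PySem.Set.add mnozica p)
    PySem.Set.empty

-- ===== PORT B =====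
def pvOffs : List (Int × Int) := [(-1, -1), (-1, 0), (-1, 1), (0, -1), (0, 1), (1, -1), (1, 0), (1, 1)]

def brez_sosedov_alt (mine : List (Int × Int)) (s : Int) (v : Int) : List (Int × Int) :=
  let mineSet : PySem.Set (Int × Int) := PySem.Set.ofList mine
  PySem.Set.ofList
    ((PySem.List.pyRange 0 s 1).flatMap (fun x =>
      ((PySem.List.pyRange 0 v 1).filter (fun y =>
        pvOffs.all (fun o => !(PySem.Set.contains mineSet (x + o.1, y + o.2))))).map
        (fun y => (x, y))))

-- ===== PRECONDITION & SPEC =====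
def Spec_brez_sosedov (mine : List (Int × Int)) (s : Int) (v : Int) (out : List (Int × Int)) : Prop := out = brez_sosedov_alt mine s v
instance (mine : List (Int × Int)) (s : Int) (v : Int) (out : List (Int × Int)) : Decidable (Spec_brez_sosedov mine s v out) := by unfold Spec_brez_sosedov; infer_instance

-- ===== CLAIM (what is proved, stated in full; the proofs are below) =====
def Claim_equal_brez_sosedov : Prop := ∀ (mine : List (Int × Int)) (s : Int) (v : Int), Dom_brez_sosedov mine s v → Spec_brez_sosedov mine s v (brez_sosedov mine s v)

-- ===== LEMMAS AND PROOFS =====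

-- A's neighbour count as a countP
lemma sosedov_foldl (x y : Int) (mine : List (Int × Int)) (n : Int) :
    mine.foldl (fun st_sosedov p =>
      if p.1 ≠ x ∨ p.2 ≠ y then
        if (|p.1 - x| = 1 ∨ |p.1 - x| = 0) ∧ (|p.2 - y| = 1 ∨ |p.2 - y| = 0) then
          st_sosedov + 1
        else st_sosedov
      else st_sosedov) n
    = n + (mine.countP (fun p => decide ((p.1 ≠ x ∨ p.2 ≠ y) ∧
        (|p.1 - x| = 1 ∨ |p.1 - x| = 0) ∧ (|p.2 - y| = 1 ∨ |p.2 - y| = 0))) : Int) := by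
  induction mine generalizing n with
  | nil => simp
  | cons p ps ih =>
    simp only [List.foldl_cons, List.countP_cons]
    split_ifs with h1 h2 <;> simp_all <;> omega

lemma pv_abs01 (t : Int) (h : t = -1 ∨ t = 0 ∨ t = 1) : |t| = 1 ∨ |t| = 0 := by
  rcases abs_cases t with ⟨h', _⟩ | ⟨h', _⟩ <;> omega

-- A's test "p is an 8-neighbour of (x,y)" ↔ "p = (x,y)+o for some offset o"
lemma nbr_iff (x y : Int) (p : Int × Int) :
    ((p.1 ≠ x ∨ p.2 ≠ y) ∧ (|p.1 - x| = 1 ∨ |p.1 - x| = 0) ∧ (|p.2 - y| = 1 ∨ |p.2 - y| = 0))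
    ↔ ∃ o ∈ pvOffs, p = (x + o.1, y + o.2) := by
  constructor
  · rintro ⟨h1, h2, h3⟩
    have hx : p.1 - x = -1 ∨ p.1 - x = 0 ∨ p.1 - x = 1 := by
      rcases abs_cases (p.1 - x) with ⟨h', _⟩ | ⟨h', _⟩ <;> rcases h2 with h | h <;> omega
    have hy : p.2 - y = -1 ∨ p.2 - y = 0 ∨ p.2 - y = 1 := by
      rcases abs_cases (p.2 - y) with ⟨h', _⟩ | ⟨h', _⟩ <;> rcases h3 with h | h <;> omega
    have hp : p = (p.1, p.2) := rfl
    refine ⟨(p.1 - x, p.2 - y), ?_, by rw [hp]; simp⟩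
    rcases hx with hx | hx | hx <;> rcases hy with hy | hy | hy <;> rw [hx, hy] <;>
      first
        | decide
        | (exfalso; rcases h1 with h | h <;> omega)
  · rintro ⟨o, ho, rfl⟩
    simp only [pvOffs, List.mem_cons, List.not_mem_nil, or_false] at ho
    rcases ho with rfl | rfl | rfl | rfl | rfl | rfl | rfl | rfl <;>
      exact ⟨by dsimp only; omega, by apply pv_abs01; dsimp only; omega,
        by apply pv_abs01; dsimp only; omega⟩

-- the two per-field tests agree: A's "no neighbouring mine" = B's 8-probe test
lemma test_iff (mine : List (Int × Int)) (x y : Int) :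
    (¬ sosedov x y mine > 0)
    ↔ (pvOffs.all (fun o => !(PySem.Set.contains (PySem.Set.ofList mine) (x + o.1, y + o.2))) = true) := by
  unfold sosedov
  rw [sosedov_foldl]
  simp only [zero_add, gt_iff_lt, Int.natCast_pos, List.countP_pos_iff, not_exists]
  simp only [List.all_eq_true, Bool.not_eq_eq_eq_not, Bool.not_true, PySem.Set.contains]
  constructor
  · intro h o ho
    rw [← Bool.not_eq_true, List.contains_iff_mem, PySem.Set.mem_ofList]
    intro hc
    exact h (x + o.1, y + o.2) ⟨hc, by rw [decide_eq_true_eq, nbr_iff]; exact ⟨o, ho, rfl⟩⟩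
  · rintro h p ⟨hp, hcp⟩
    rw [decide_eq_true_eq, nbr_iff] at hcp
    obtain ⟨o, ho, rfl⟩ := hcp
    have := h o ho
    rw [← Bool.not_eq_true, List.contains_iff_mem, PySem.Set.mem_ofList] at this
    exact this hp

-- folding add-or-skip = folding add over the filtered list
lemma foldl_add_skip (c : Int × Int → Prop) [DecidablePred c]
    (L : List (Int × Int)) (acc : PySem.Set (Int × Int)) :
    L.foldl (fun mnozica p => if c p then mnozica else PySem.Set.add mnozica p) acc
    = (L.filter (fun p => !decide (c p))).foldl PySem.Set.add acc := by
  induction L generalizing acc with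
  | nil => rfl
  | cons p ps ih =>
    by_cases h : c p <;> simp [h, ih]

-- ===== VERDICT (by name: the statement is the Claim_ definition above) =====
theorem brez_sosedov_spec : Claim_equal_brez_sosedov := by
  intro mine s v _
  unfold Spec_brez_sosedov brez_sosedov brez_sosedov_alt
  dsimp only
  rw [foldl_add_skip (fun p => sosedov p.1 p.2 mine > 0), PySem.Set.empty_eq,
    ← PySem.Set.ofList_eq_foldl]
  congr 1
  unfold vsa_polja
  rw [List.filter_flatMap]
  apply List.flatMap_congr
  intro x _
  rw [List.filter_map]
  congr 1
  apply List.filter_congr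
  intro y _
  simp only [Function.comp]
  rw [Bool.eq_iff_iff, Bool.not_eq_true', decide_eq_false_iff_not]
  exact test_iff mine x y
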